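-- pv_equiv track=rewrite | github.com/rohansiddeshwara-stride/GeneralNER | generalner_3.py | list_of_lists_to_dict
-- ===== SOURCE A (Python) =====
-- def list_of_lists_to_dict(list_of_lists):
--
--     result_dict = {}
--
--     for inner_list in list_of_lists:
--       key = tuple(inner_list[2:])
--       value = {"NE" : [],"text":[inner_list[1]]}
--
--       # Check if the key already exists in the dictionary
--       if key in result_dict:
--           ner_list=result_dict[key]["NE"]
--
--           if inner_list[0] not in ner_list:
--             result_dict[key]["NE"].append(inner_list[0])
--
--       else:
--           result_dict[key] = value
--           result_dict[key]["NE"].append(inner_list[0])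
--
--
--
--     return result_dict
-- ===== SOURCE B (Python) =====
-- def list_of_lists_to_dict(list_of_lists):
--     # Two-pass: collect all first-column values per key, then dedup once at the end.
--     groups = {}
--     texts = {}
--     for inner_list in list_of_lists:
--         key = tuple(inner_list[2:])
--         groups.setdefault(key, []).append(inner_list[0])
--         texts.setdefault(key, inner_list[1])
--     return {key: {"NE": list(dict.fromkeys(values)), "text": [texts[key]]}
--             for key, values in groups.items()}
-- ===== Notes on version B (the rewrite author's own statement) =====
-- stated objective: simpler
-- what changed: B groups all first-column values per key in one pass (setdefault/append) plus a first-text map, then builds the result in a second pass deduplicating each group once with dict.fromkeys, instead of A's per-row membership test and in-place mutation of the growing NE list.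
import Mathlib
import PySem

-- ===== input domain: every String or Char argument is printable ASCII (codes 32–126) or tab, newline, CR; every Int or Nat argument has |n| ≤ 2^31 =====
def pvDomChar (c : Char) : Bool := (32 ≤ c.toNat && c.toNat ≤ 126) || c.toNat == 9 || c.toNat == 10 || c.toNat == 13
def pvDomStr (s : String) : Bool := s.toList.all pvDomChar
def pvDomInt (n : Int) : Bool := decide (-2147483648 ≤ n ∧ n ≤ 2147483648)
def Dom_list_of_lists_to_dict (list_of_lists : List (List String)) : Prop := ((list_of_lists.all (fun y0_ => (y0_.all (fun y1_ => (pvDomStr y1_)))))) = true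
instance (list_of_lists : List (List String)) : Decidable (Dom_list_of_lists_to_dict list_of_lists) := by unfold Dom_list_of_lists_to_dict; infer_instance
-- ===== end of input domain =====

-- B collects all first-column values per key in one pass and deduplicates once at the end
-- (setdefault + dict.fromkeys) instead of A's per-row membership test on the growing "NE" list; objective: simpler.


-- ===== PORT A =====
-- loop body of A: key = tuple(inner_list[2:]); value = {"NE": [], "text": [inner_list[1]]};
-- if key present: append inner_list[0] to NE unless already there; else insert value and append inner_list[0].
def pyStepA (result_dict : PySem.Dict (List String) (PySem.Dict String (List String)))
    (inner_list : List String) : PySem.Dict (List String) (PySem.Dict String (List String)) :=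
  let key := PySem.List.slice inner_list (some 2) none
  match PySem.List.pyGet? inner_list 1 with  -- inner_list[1] (IndexError → none, excluded by Pre_)
  | none => result_dict
  | some t1 =>
    let value : PySem.Dict String (List String) := PySem.Dict.ofList [("NE", []), ("text", [t1])]
    match PySem.List.pyGet? inner_list 0 with  -- inner_list[0]
    | none => result_dict
    | some v0 =>
      if result_dict.contains key then
        let ner_list := (result_dict.getD key PySem.Dict.empty).getD "NE" []
        if ner_list.contains v0 then result_dict
        else result_dict.modify key PySem.Dict.empty (fun d => d.modify "NE" [] (fun xs => xs ++ [v0]))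
      else
        (result_dict.insert key value).modify key PySem.Dict.empty (fun d => d.modify "NE" [] (fun xs => xs ++ [v0]))

def list_of_lists_to_dict (list_of_lists : List (List String)) : List (List String × List (String × List String)) :=
  (list_of_lists.foldl pyStepA PySem.Dict.empty).items.map (fun p => (p.1, p.2.items))

-- ===== PORT B =====
-- loop body of B: groups.setdefault(key, []).append(inner_list[0]); texts.setdefault(key, inner_list[1])
def pyStepB (st : PySem.Dict (List String) (List String) × PySem.Dict (List String) String)
    (inner_list : List String) : PySem.Dict (List String) (List String) × PySem.Dict (List String) String :=
  let key := PySem.List.slice inner_list (some 2) none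
  match PySem.List.pyGet? inner_list 0 with
  | none => st
  | some v0 =>
    match PySem.List.pyGet? inner_list 1 with
    | none => st
    | some t1 =>
      (st.1.modify key [] (fun xs => xs ++ [v0]), st.2.setdefault key t1)

def list_of_lists_to_dict_alt (list_of_lists : List (List String)) : List (List String × List (String × List String)) :=
  let st := list_of_lists.foldl pyStepB (PySem.Dict.empty, PySem.Dict.empty)
  st.1.items.map (fun p => (p.1, [("NE", PySem.List.dedup p.2), ("text", [st.2.getD p.1 ""])]))

-- ===== PRECONDITION & SPEC =====
-- Pre_ excludes exactly the rows on which Python A raises IndexError (inner_list[1] on a row shorter than 2).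
def Pre_list_of_lists_to_dict (list_of_lists : List (List String)) : Prop :=
  ∀ inner ∈ list_of_lists, 2 ≤ inner.length
instance (list_of_lists : List (List String)) : Decidable (Pre_list_of_lists_to_dict list_of_lists) := by
  unfold Pre_list_of_lists_to_dict; infer_instance
def pvWitness_list_of_lists_to_dict : List (List String) :=
  [["a", "s1", "k"], ["b", "s2", "k"], ["a", "s3", "j", "x"]]
def Spec_list_of_lists_to_dict (list_of_lists : List (List String)) (out : List (List String × List (String × List String))) : Prop := out = list_of_lists_to_dict_alt list_of_lists
instance (list_of_lists : List (List String)) (out : List (List String × List (String × List String))) : Decidable (Spec_list_of_lists_to_dict list_of_lists out) := by unfold Spec_list_of_lists_to_dict; infer_instance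

-- ===== CLAIM (what is proved, stated in full; the proofs are below) =====
def Claim_equal_list_of_lists_to_dict : Prop := ∀ (list_of_lists : List (List String)), Dom_list_of_lists_to_dict list_of_lists → Pre_list_of_lists_to_dict list_of_lists → Spec_list_of_lists_to_dict list_of_lists (list_of_lists_to_dict list_of_lists)

-- ===== LEMMAS AND PROOFS =====

-- Abstract state shared by both loops: one entry (key, text-of-first-row, collected values) per key.
abbrev PvRow := List String × String × List String

def pvStepL (l : List PvRow) (key : List String) (v0 t1 : String) : List PvRow :=
  if l.any (fun e => e.1 == key) then
    l.map (fun e => if e.1 == key then (e.1, e.2.1, e.2.2 ++ [v0]) else e)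
  else l ++ [(key, t1, [v0])]

lemma pv_no_key_of_any_false (l : List PvRow) (key : List String)
    (h : ¬ l.any (fun e => e.1 == key) = true) : ∀ e ∈ l, (e.1 == key) = false := by
  intro e he
  rw [Bool.not_eq_true, List.any_eq_false] at h
  simpa using h e he

lemma pv_notmem_of_any_false (l : List PvRow) (key : List String)
    (h : ¬ l.any (fun e => e.1 == key) = true) : key ∉ l.map (fun e => e.1) := by
  intro hk
  obtain ⟨e, he, hk⟩ := List.mem_map.mp hk
  have := pv_no_key_of_any_false l key h e he
  simp [hk] at this

lemma pv_keys_stepL (l : List PvRow) (key : List String) (v0 t1 : String) :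
    (pvStepL l key v0 t1).map (fun e => e.1) =
      if l.any (fun e => e.1 == key) then l.map (fun e => e.1) else l.map (fun e => e.1) ++ [key] := by
  unfold pvStepL
  split
  · simp only [List.map_map]
    apply List.map_congr_left
    intro e _
    by_cases h : e.1 = key <;> simp [h]
  · simp [*]

lemma pv_nodup_stepL (l : List PvRow) (key : List String) (v0 t1 : String)
    (hnd : (l.map (fun e => e.1)).Nodup) : ((pvStepL l key v0 t1).map (fun e => e.1)).Nodup := by
  rw [pv_keys_stepL]
  split
  · exact hnd
  · rename_i h
    simp only [List.nodup_append, List.nodup_cons]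
    refine ⟨hnd, by simp, ?_⟩
    intro a ha b hb heq
    rw [List.mem_singleton] at hb
    exact pv_notmem_of_any_false l key h (hb ▸ heq ▸ ha)

lemma pv_exists_split (l : List PvRow) (key : List String)
    (h : l.any (fun e => e.1 == key) = true) (hnd : (l.map (fun e => e.1)).Nodup) :
    ∃ l1 e l2, l = l1 ++ e :: l2 ∧ e.1 = key ∧ (∀ x ∈ l1, (x.1 == key) = false) ∧ (∀ x ∈ l2, (x.1 == key) = false) := by
  simp only [List.any_eq_true, beq_iff_eq] at h
  obtain ⟨e, he, hk⟩ := h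
  obtain ⟨l1, l2, rfl⟩ := List.append_of_mem he
  subst hk
  simp only [List.map_append, List.map_cons] at hnd
  rw [List.nodup_append] at hnd
  have h1 : e.1 ∉ List.map (fun e => e.1) l1 := fun hmem => hnd.2.2 e.1 hmem e.1 (by simp) rfl
  have h2 : e.1 ∉ List.map (fun e => e.1) l2 := (List.nodup_cons.mp hnd.2.1).1
  refine ⟨l1, e, l2, rfl, rfl, ?_, ?_⟩
  · intro x hx
    simp only [beq_eq_false_iff_ne, ne_eq]
    exact fun hk => h1 (hk ▸ List.mem_map_of_mem hx)
  · intro x hx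
    simp only [beq_eq_false_iff_ne, ne_eq]
    exact fun hk => h2 (hk ▸ List.mem_map_of_mem hx)

lemma pv_map_id_of {α : Type} (l : List α) (f : α → α) (h : ∀ x ∈ l, f x = x) : l.map f = l := by
  rw [List.map_congr_left h, List.map_id']

lemma pv_find?_no_key {α : Type} (l : List (List String × α)) (k : List String)
    (h : ∀ e ∈ l, (e.1 == k) = false) : l.find? (fun p => p.1 == k) = none :=
  List.find?_eq_none.mpr (fun x hx => by simp [h x hx])

def pvVA (e : PvRow) : PySem.Dict String (List String) :=
  PySem.Dict.mk [("NE", PySem.List.dedup e.2.2), ("text", [e.2.1])]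

def pvRepA (l : List PvRow) : PySem.Dict (List String) (PySem.Dict String (List String)) :=
  PySem.Dict.mk (l.map (fun e => (e.1, pvVA e)))

def pvRepG (l : List PvRow) : PySem.Dict (List String) (List String) :=
  PySem.Dict.mk (l.map (fun e => (e.1, e.2.2)))

def pvRepT (l : List PvRow) : PySem.Dict (List String) String :=
  PySem.Dict.mk (l.map (fun e => (e.1, e.2.1)))

lemma pv_vA_getD (ne : List String) (t : String) :
    (PySem.Dict.mk [("NE", ne), ("text", [t])]).getD "NE" [] = ne := by
  simp [PySem.Dict.getD, PySem.Dict.get?, List.find?]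

lemma pv_vA_modify (ne : List String) (t v0 : String) :
    (PySem.Dict.mk [("NE", ne), ("text", [t])]).modify "NE" [] (fun xs => xs ++ [v0])
      = PySem.Dict.mk [("NE", ne ++ [v0]), ("text", [t])] := by
  simp [PySem.Dict.modify, PySem.Dict.insert, PySem.Dict.contains, PySem.Dict.getD, PySem.Dict.get?, List.find?]

lemma pv_modify_eq_insert {κ ν : Type} [BEq κ] (d : PySem.Dict κ ν) (k : κ) (dflt : ν) (f : ν → ν) :
    d.modify k dflt f = d.insert k (f (d.getD k dflt)) := rfl

lemma pv_vA_modify' (e : PvRow) (v0 : String) :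
    (pvVA e).modify "NE" [] (fun xs => xs ++ [v0])
      = PySem.Dict.mk [("NE", PySem.List.dedup e.2.2 ++ [v0]), ("text", [e.2.1])] :=
  pv_vA_modify _ _ _

lemma pv_dedup_append (vs : List String) (v : String) :
    PySem.List.dedup (vs ++ [v]) =
      if vs.contains v then PySem.List.dedup vs else PySem.List.dedup vs ++ [v] := by
  have h : PySem.List.dedup (vs ++ [v]) = PySem.Set.add (PySem.List.dedup vs) v := by
    simp [PySem.List.dedup, PySem.Set.ofList, List.foldl_append]
  rw [h]
  unfold PySem.Set.add
  by_cases hv : v ∈ vs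
  · have h2 : PySem.Set.contains (PySem.List.dedup vs) v = true := by
      simpa [PySem.Set.contains, List.contains_iff_mem, PySem.List.mem_dedup] using hv
    simp [h2]
  · have h2 : PySem.Set.contains (PySem.List.dedup vs) v = false := by
      simpa [PySem.Set.contains, List.contains_iff_mem, PySem.List.mem_dedup] using hv
    simp [h2]

lemma pv_contains_dedup (vs : List String) (v : String) :
    (PySem.List.dedup vs).contains v = vs.contains v := by
  simp [List.contains_iff_mem]

lemma pv_stepA_rep (l : List PvRow) (hnd : (l.map (fun e => e.1)).Nodup)
    (key : List String) (v0 t1 : String) :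
    (let value : PySem.Dict String (List String) := PySem.Dict.ofList [("NE", []), ("text", [t1])]
     if (pvRepA l).contains key then
       let ner_list := ((pvRepA l).getD key PySem.Dict.empty).getD "NE" []
       if ner_list.contains v0 then pvRepA l
       else (pvRepA l).modify key PySem.Dict.empty (fun d => d.modify "NE" [] (fun xs => xs ++ [v0]))
     else ((pvRepA l).insert key value).modify key PySem.Dict.empty (fun d => d.modify "NE" [] (fun xs => xs ++ [v0])))
    = pvRepA (pvStepL l key v0 t1) := by
  have hofl : PySem.Dict.ofList [("NE", ([] : List String)), ("text", [t1])]
      = PySem.Dict.mk [("NE", []), ("text", [t1])] := rfl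
  by_cases h : l.any (fun e => e.1 == key) = true
  · obtain ⟨l1, e, l2, rfl, hk, h1, h2⟩ := pv_exists_split _ key h hnd
    have hA1 : ∀ p ∈ (l1.map (fun e => (e.1, pvVA e))), (p.1 == key) = false := by
      intro p hp; obtain ⟨x, hx, rfl⟩ := List.mem_map.mp hp; exact h1 x hx
    have hco : (pvRepA (l1 ++ e :: l2)).contains key = true := by
      simp [pvRepA, PySem.Dict.contains, hk]
    have hget : (pvRepA (l1 ++ e :: l2)).getD key PySem.Dict.empty = pvVA e := by
      simp [pvRepA, PySem.Dict.getD, PySem.Dict.get?, List.find?_append, pv_find?_no_key _ _ hA1, hk]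
    simp only [hco, if_true, hget]
    rw [show pvVA e = PySem.Dict.mk [("NE", PySem.List.dedup e.2.2), ("text", [e.2.1])] from rfl,
      pv_vA_getD]
    unfold pvStepL
    rw [if_pos h]
    by_cases hv : e.2.2.contains v0 = true
    · rw [if_pos (by rw [pv_contains_dedup]; exact hv)]
      simp only [pvRepA, List.map_map, PySem.Dict.mk.injEq]
      apply List.map_congr_left
      intro x hx
      by_cases hxk : x.1 = key
      · have hxe : x = e := by
          rcases List.mem_append.mp hx with hx1 | hx2
          · exact absurd (by simpa using h1 x hx1) (by simp [hxk])
          · rcases List.mem_cons.mp hx2 with hx2 | hx2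
            · exact hx2
            · exact absurd (by simpa using h2 x hx2) (by simp [hxk])
        subst hxe
        have hd : pvVA (key, x.2.1, x.2.2 ++ [v0]) = pvVA x := by
          simp only [pvVA]
          rw [pv_dedup_append, if_pos hv]
        simp [Function.comp_def, hxk, hd]
      · simp [Function.comp_def, hxk]
    · rw [if_neg (fun hh => hv (by rwa [pv_contains_dedup] at hh))]
      rw [pv_modify_eq_insert]
      simp only [hget, pv_vA_modify']
      simp only [PySem.Dict.insert, hco, if_true]
      simp only [pvRepA, PySem.Dict.items, List.map_append, List.map_cons, List.map_map,
        PySem.Dict.mk.injEq]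
      congr 1
      · exact List.map_congr_left (fun x hx => by
          have hne : x.1 ≠ key := by simpa using h1 x hx
          simp [Function.comp_def, hne])
      · congr 1
        · have hd : pvVA (key, e.2.1, e.2.2 ++ [v0])
              = PySem.Dict.mk [("NE", PySem.List.dedup e.2.2 ++ [v0]), ("text", [e.2.1])] := by
            simp only [pvVA]
            rw [pv_dedup_append, if_neg hv]
          simp [Function.comp_def, hk, hd]
        · exact List.map_congr_left (fun x hx => by
            have hne : x.1 ≠ key := by simpa using h2 x hx
            simp [Function.comp_def, hne])
  · have hno : ∀ e ∈ l, (e.1 == key) = false := pv_no_key_of_any_false l key h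
    have hA : ∀ p ∈ (l.map (fun e => (e.1, pvVA e))), (p.1 == key) = false := by
      intro p hp; obtain ⟨x, hx, rfl⟩ := List.mem_map.mp hp; exact hno x hx
    have hco : (pvRepA l).contains key = false := by
      rw [Bool.not_eq_true] at h
      simp only [pvRepA, PySem.Dict.contains, List.any_map]
      simpa only [Function.comp_def] using h
    simp only [hco, Bool.false_eq_true, if_false, hofl]
    unfold pvStepL
    rw [if_neg h]
    have hins : (pvRepA l).insert key (PySem.Dict.mk [("NE", []), ("text", [t1])])
        = PySem.Dict.mk (l.map (fun e => (e.1, pvVA e)) ++ [(key, PySem.Dict.mk [("NE", []), ("text", [t1])])]) := by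
      simp only [PySem.Dict.insert, hco, Bool.false_eq_true, if_false]
      simp only [pvRepA, PySem.Dict.items]
    rw [hins, pv_modify_eq_insert]
    have hget2 : (PySem.Dict.mk (l.map (fun e => (e.1, pvVA e)) ++ [(key, PySem.Dict.mk [("NE", ([] : List String)), ("text", [t1])])])).getD key PySem.Dict.empty
        = PySem.Dict.mk [("NE", []), ("text", [t1])] := by
      simp only [PySem.Dict.getD, PySem.Dict.get?, PySem.Dict.items]
      rw [List.find?_append, pv_find?_no_key _ _ hA]
      simp [List.find?_cons_of_pos]
    rw [hget2, pv_vA_modify]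
    have hco2 : (PySem.Dict.mk (l.map (fun e => (e.1, pvVA e)) ++ [(key, PySem.Dict.mk [("NE", ([] : List String)), ("text", [t1])])])).contains key = true := by
      simp [PySem.Dict.contains]
    simp only [PySem.Dict.insert, hco2, if_true]
    simp only [PySem.Dict.items, List.map_append, pvRepA, PySem.Dict.mk.injEq]
    congr 1
    · exact pv_map_id_of _ _ (fun x hx => by simp [hA x hx])
    · have hd : PySem.List.dedup [v0] = [v0] := rfl
      simp [pvVA, hd]
      rfl

lemma pv_stepB_rep (l : List PvRow) (hnd : (l.map (fun e => e.1)).Nodup)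
    (key : List String) (v0 t1 : String) :
    ((pvRepG l).modify key [] (fun xs => xs ++ [v0]), (pvRepT l).setdefault key t1)
    = (pvRepG (pvStepL l key v0 t1), pvRepT (pvStepL l key v0 t1)) := by
  by_cases h : l.any (fun e => e.1 == key) = true
  · obtain ⟨l1, e, l2, rfl, hk, h1, h2⟩ := pv_exists_split _ key h hnd
    have hG1 : ∀ p ∈ (l1.map (fun e => (e.1, e.2.2))), (p.1 == key) = false := by
      intro p hp; obtain ⟨x, hx, rfl⟩ := List.mem_map.mp hp; exact h1 x hx
    have hT1 : ∀ p ∈ (l1.map (fun e => (e.1, e.2.1))), (p.1 == key) = false := by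
      intro p hp; obtain ⟨x, hx, rfl⟩ := List.mem_map.mp hp; exact h1 x hx
    have hco : (pvRepG (l1 ++ e :: l2)).contains key = true := by
      simp [pvRepG, PySem.Dict.contains, hk]
    have hcoT : (pvRepT (l1 ++ e :: l2)).contains key = true := by
      simp [pvRepT, PySem.Dict.contains, hk]
    have hget : (pvRepG (l1 ++ e :: l2)).getD key [] = e.2.2 := by
      simp [pvRepG, PySem.Dict.getD, PySem.Dict.get?, List.find?_append, pv_find?_no_key _ _ hG1, List.find?_cons, hk]
    unfold pvStepL
    rw [if_pos h]
    simp only [PySem.Dict.modify, hget, PySem.Dict.insert, hco, PySem.Dict.setdefault, hcoT,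
      if_pos, Prod.mk.injEq]
    refine ⟨?_, ?_⟩
    · simp only [pvRepG, List.map_append, List.map_cons, List.map_map,
        PySem.Dict.mk.injEq]
      congr 1
      · exact List.map_congr_left (fun x hx => by simp [Function.comp, h1 x hx])
      · congr 1
        · simp [hk]
        · exact List.map_congr_left (fun x hx => by simp [Function.comp, h2 x hx])
    · simp only [pvRepT, List.map_map, PySem.Dict.mk.injEq]
      apply List.map_congr_left
      intro x hx
      by_cases hxk : x.1 = key <;> simp [Function.comp, hxk]
  · have hno : ∀ e ∈ l, (e.1 == key) = false := pv_no_key_of_any_false l key h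
    have hG : ∀ p ∈ (l.map (fun e => (e.1, e.2.2))), (p.1 == key) = false := by
      intro p hp; obtain ⟨x, hx, rfl⟩ := List.mem_map.mp hp; exact hno x hx
    have hco : (pvRepG l).contains key = false := by
      rw [Bool.not_eq_true] at h
      simp only [pvRepG, PySem.Dict.contains, List.any_map]
      simpa only [Function.comp_def] using h
    have hcoT : (pvRepT l).contains key = false := by
      rw [Bool.not_eq_true] at h
      simp only [pvRepT, PySem.Dict.contains, List.any_map]
      simpa only [Function.comp_def] using h
    have hget : (pvRepG l).getD key [] = [] := by
      simp [pvRepG, PySem.Dict.getD, PySem.Dict.get?, pv_find?_no_key _ _ hG]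
    unfold pvStepL
    rw [if_neg h]
    simp only [PySem.Dict.modify, PySem.Dict.insert, PySem.Dict.setdefault, hco, hcoT, hget,
      Bool.false_eq_true, if_false]
    simp [pvRepG, pvRepT]

def pvStepRow (l : List PvRow) (inner : List String) : List PvRow :=
  match PySem.List.pyGet? inner 1 with
  | none => l
  | some t1 =>
    match PySem.List.pyGet? inner 0 with
    | none => l
    | some v0 => pvStepL l (PySem.List.slice inner (some 2) none) v0 t1

lemma pv_nodup_stepRow (l : List PvRow) (inner : List String)
    (hnd : (l.map (fun e => e.1)).Nodup) : ((pvStepRow l inner).map (fun e => e.1)).Nodup := by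
  unfold pvStepRow
  cases PySem.List.pyGet? inner 1 with
  | none => exact hnd
  | some t1 =>
    cases PySem.List.pyGet? inner 0 with
    | none => exact hnd
    | some v0 => exact pv_nodup_stepL _ _ _ _ hnd

lemma pv_stepRowA (l : List PvRow) (hnd : (l.map (fun e => e.1)).Nodup) (r : List String) :
    pyStepA (pvRepA l) r = pvRepA (pvStepRow l r) := by
  unfold pyStepA pvStepRow
  cases h1 : PySem.List.pyGet? r 1 with
  | none => rfl
  | some t1 =>
    cases h0 : PySem.List.pyGet? r 0 with
    | none => rfl
    | some v0 => exact pv_stepA_rep l hnd _ v0 t1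

lemma pv_stepRowB (l : List PvRow) (hnd : (l.map (fun e => e.1)).Nodup) (r : List String) :
    pyStepB (pvRepG l, pvRepT l) r = (pvRepG (pvStepRow l r), pvRepT (pvStepRow l r)) := by
  unfold pyStepB pvStepRow
  cases h1 : PySem.List.pyGet? r 1 with
  | none =>
    cases h0 : PySem.List.pyGet? r 0 with
    | none => rfl
    | some v0 => rfl
  | some t1 =>
    cases h0 : PySem.List.pyGet? r 0 with
    | none => rfl
    | some v0 => exact pv_stepB_rep l hnd _ v0 t1

lemma pv_foldA (rows : List (List String)) (l : List PvRow) (hnd : (l.map (fun e => e.1)).Nodup) :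
    rows.foldl pyStepA (pvRepA l) = pvRepA (rows.foldl pvStepRow l) := by
  induction rows generalizing l with
  | nil => rfl
  | cons r rs ih =>
    simp only [List.foldl_cons]
    rw [pv_stepRowA l hnd r]
    exact ih _ (pv_nodup_stepRow l r hnd)

lemma pv_foldB (rows : List (List String)) (l : List PvRow) (hnd : (l.map (fun e => e.1)).Nodup) :
    rows.foldl pyStepB (pvRepG l, pvRepT l) = (pvRepG (rows.foldl pvStepRow l), pvRepT (rows.foldl pvStepRow l)) := by
  induction rows generalizing l with
  | nil => rfl
  | cons r rs ih =>
    simp only [List.foldl_cons]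
    rw [pv_stepRowB l hnd r]
    exact ih _ (pv_nodup_stepRow l r hnd)

lemma pv_nodup_fold (rows : List (List String)) (l : List PvRow) (hnd : (l.map (fun e => e.1)).Nodup) :
    ((rows.foldl pvStepRow l).map (fun e => e.1)).Nodup := by
  induction rows generalizing l with
  | nil => exact hnd
  | cons r rs ih => exact ih _ (pv_nodup_stepRow l r hnd)

lemma pv_getD_repT (l : List PvRow) (hnd : (l.map (fun e => e.1)).Nodup) (e : PvRow) (he : e ∈ l) :
    (pvRepT l).getD e.1 "" = e.2.1 := by
  obtain ⟨l1, l2, rfl⟩ := List.append_of_mem he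
  simp only [List.map_append, List.map_cons] at hnd
  rw [List.nodup_append] at hnd
  have h1 : ∀ x ∈ l1, (x.1 == e.1) = false := by
    intro x hx
    simp only [beq_eq_false_iff_ne, ne_eq]
    exact fun hk => hnd.2.2 x.1 (List.mem_map_of_mem hx) e.1 (by simp) hk
  have hT1 : ∀ p ∈ (l1.map (fun e => (e.1, e.2.1))), (p.1 == e.1) = false := by
    intro p hp; obtain ⟨x, hx, rfl⟩ := List.mem_map.mp hp; exact h1 x hx
  simp [pvRepT, PySem.Dict.getD, PySem.Dict.get?, List.find?_append, pv_find?_no_key _ _ hT1]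

-- ===== VERDICT (by name: the statement is the Claim_ definition above) =====
theorem list_of_lists_to_dict_spec : Claim_equal_list_of_lists_to_dict := by
  intro lol _ _
  unfold Spec_list_of_lists_to_dict
  unfold list_of_lists_to_dict list_of_lists_to_dict_alt
  have hA := pv_foldA lol [] (by simp)
  have hB := pv_foldB lol [] (by simp)
  have hnd := pv_nodup_fold lol [] (by simp)
  set L := lol.foldl pvStepRow [] with hL
  have eA : (PySem.Dict.empty : PySem.Dict (List String) (PySem.Dict String (List String))) = pvRepA [] := rfl
  have eB : ((PySem.Dict.empty, PySem.Dict.empty) : PySem.Dict (List String) (List String) × PySem.Dict (List String) String) = (pvRepG [], pvRepT []) := rfl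
  rw [eA, eB, hA, hB]
  simp only [pvRepA, pvRepG, List.map_map]
  apply List.map_congr_left
  intro e he
  simp only [Function.comp, pvVA]
  rw [pv_getD_repT L hnd e he]
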